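-- pv_equiv track=rewrite | github.com/kcollett1/ProjectEuler | misc_programs/digrootsort.py | digitRootSort
-- ===== SOURCE A (Python) =====
-- def digitRootSort(a):
--     ans = []
--     digroots = []
--
--     for el in a:
--         digroots.append([sum([int(i) for i in str(el)]), el])
--
--     digroots = sorted(digroots)
--
--     for (r,n) in digroots:
--         ans.append(n)
--
--     return ans
-- ===== SOURCE B (Python) =====
-- def digitRootSort(a):
--     buckets = {}
--     for el in a:
--         r = sum(int(i) for i in str(el))
--         buckets.setdefault(r, []).append(el)
--     ans = []
--     for r in sorted(buckets):
--         ans.extend(sorted(buckets[r]))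
--     return ans
-- ===== Notes on version B (the rewrite author's own statement) =====
-- stated objective: alternative
-- what changed: Replaces the global decorate-sort-undecorate over (digit-sum, value) pairs by a dict grouping elements by digit sum, then iterating the sorted keys and extending with each bucket sorted ascending.
import Mathlib
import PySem

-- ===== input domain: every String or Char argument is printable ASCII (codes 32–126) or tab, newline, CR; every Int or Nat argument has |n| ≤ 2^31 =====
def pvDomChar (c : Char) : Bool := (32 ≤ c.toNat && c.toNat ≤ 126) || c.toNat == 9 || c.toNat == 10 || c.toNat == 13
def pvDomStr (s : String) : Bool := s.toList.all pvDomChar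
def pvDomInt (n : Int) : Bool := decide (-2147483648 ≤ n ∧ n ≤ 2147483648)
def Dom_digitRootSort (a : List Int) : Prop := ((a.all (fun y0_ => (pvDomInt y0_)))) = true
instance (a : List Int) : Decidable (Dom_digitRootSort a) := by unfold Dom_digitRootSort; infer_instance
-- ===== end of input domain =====

-- B groups elements into a dict keyed by digit sum and concatenates the per-key sorted buckets over
-- the sorted keys, instead of A's single sort of (digit-sum, value) pairs. Equivalence of the return
-- values is proved on Pre_ (all elements nonnegative; both Pythons raise ValueError otherwise).

-- sum([int(i) for i in str(el)]): exact for 0 ≤ el (Pre_), where every char of str(el) is a digit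
-- and int(c) = c.toNat - 48.  Shared helper: both Source A and Source B compute this identical expression.
def pvDigSum (el : Int) : Int :=
  ((PySem.Int.toStr el).toList.map (fun c => ((c.toNat : Int) - 48))).sum

-- ===== PORT A =====
def digitRootSort (a : List Int) : List Int :=
  let digroots := a.foldl (fun acc el => acc ++ [(pvDigSum el, el)]) []
  let digroots := PySem.List.sorted2 digroots (fun p => p.1) (fun p => p.2)
  digroots.foldl (fun ans p => ans ++ [p.2]) []

-- ===== PORT B =====
def digitRootSort_alt (a : List Int) : List Int :=
  let buckets := a.foldl (fun d el => d.modify (pvDigSum el) [] (· ++ [el])) PySem.Dict.empty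
  (PySem.List.sorted buckets.keys (fun k => k)).foldl
    (fun ans r => ans ++ PySem.List.sorted (buckets.getD r []) (fun x => x)) []

-- ===== PRECONDITION & SPEC =====
-- Pre_ excludes lists containing a negative element: there str(el) starts with '-' and
-- int('-') raises ValueError in both A and B.
def Pre_digitRootSort (a : List Int) : Prop := ∀ el ∈ a, 0 ≤ el
instance (a : List Int) : Decidable (Pre_digitRootSort a) := by unfold Pre_digitRootSort; infer_instance
def pvWitness_digitRootSort : List Int := [10, 3, 21, 3, 100]
def Spec_digitRootSort (a : List Int) (out : List Int) : Prop := out = digitRootSort_alt a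
instance (a : List Int) (out : List Int) : Decidable (Spec_digitRootSort a out) := by unfold Spec_digitRootSort; infer_instance

-- ===== CLAIM (what is proved, stated in full; the proofs are below) =====
def Claim_equal_digitRootSort : Prop := ∀ (a : List Int), Dom_digitRootSort a → Pre_digitRootSort a → Spec_digitRootSort a (digitRootSort a)

-- ===== LEMMAS AND PROOFS =====

-- the sort key both sides realise: the pair (digit sum, value), lexicographically
def pvK (x : Int) : Lex (Int × Int) := toLex (pvDigSum x, x)

lemma pvK_inj : Function.Injective pvK := by
  intro x y h
  have := congrArg (fun z => (ofLex z).2) h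
  simpa [pvK] using this

-- Python's sort of 2-element lists is the lexicographic sort on pairs
lemma sorted2_eq_sorted_lex (xs : List (Int × Int)) :
    PySem.List.sorted2 xs (fun p => p.1) (fun p => p.2) =
      PySem.List.sorted xs (fun p => toLex (p.1, p.2)) := by
  show xs.foldl (fun acc x => PySem.List.insertBy _ x acc) [] =
       xs.foldl (fun acc x => PySem.List.insertBy _ x acc) []
  have hb : (fun (a b : Int × Int) =>
        decide (a.1 < b.1) || (!decide (b.1 < a.1) && decide (a.2 < b.2))) =
      (fun (a b : Int × Int) => decide (toLex (a.1, a.2) < toLex (b.1, b.2))) := by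
    funext a b
    by_cases h1 : a.1 < b.1
    · simp [h1, Prod.Lex.toLex_lt_toLex]
    · by_cases h2 : b.1 < a.1
      · simp [h1, h2, Prod.Lex.toLex_lt_toLex, ne_of_gt h2]
      · have he : a.1 = b.1 := le_antisymm (not_lt.mp h2) (not_lt.mp h1)
        simp [he, Prod.Lex.toLex_lt_toLex]
  rw [hb]

lemma A_closed (a : List Int) :
    digitRootSort a =
      (PySem.List.sorted (a.map (fun el => (pvDigSum el, el)))
        (fun p => toLex (p.1, p.2))).map (fun p => p.2) := by
  unfold digitRootSort
  rw [PySem.List.foldl_append_singleton_eq_map, List.nil_append, sorted2_eq_sorted_lex,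
    PySem.List.foldl_append_singleton_eq_map, List.nil_append]

lemma A_perm (a : List Int) : (digitRootSort a).Perm a := by
  rw [A_closed]
  have h1 := (PySem.List.sorted_perm (a.map (fun el => (pvDigSum el, el)))
      (fun p => toLex (p.1, p.2)) false).map (fun p : Int × Int => p.2)
  simpa [Function.comp_def] using h1

lemma A_pairwise (a : List Int) :
    (digitRootSort a).Pairwise (fun x y => pvK x ≤ pvK y) := by
  rw [A_closed]
  rw [List.pairwise_map]
  refine (PySem.List.sorted_pairwise (a.map (fun el => (pvDigSum el, el)))
      (fun p => toLex (p.1, p.2))).imp_of_mem ?_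
  intro p q hp hq h
  have hp' : p.1 = pvDigSum p.2 := by
    have := (PySem.List.mem_sorted _ _ _ _).mp hp
    obtain ⟨el, _, rfl⟩ := List.mem_map.mp this
    rfl
  have hq' : q.1 = pvDigSum q.2 := by
    have := (PySem.List.mem_sorted _ _ _ _).mp hq
    obtain ⟨el, _, rfl⟩ := List.mem_map.mp this
    rfl
  simpa [pvK, hp', hq'] using h

-- B unfolded: the sorted distinct digit sums, each bucket the sorted filter of a
lemma B_closed (a : List Int) :
    digitRootSort_alt a =
      (PySem.List.sorted (PySem.Set.ofList (a.map pvDigSum)) (fun k => k)).flatMap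
        (fun k => PySem.List.sorted (a.filter (fun el => pvDigSum el == k)) (fun x => x)) := by
  unfold digitRootSort_alt
  have hfold : a.foldl (fun d el => d.modify (pvDigSum el) [] (· ++ [el])) PySem.Dict.empty =
      (a.map (fun el => (pvDigSum el, el))).foldl
        (fun d p => d.modify p.1 [] (· ++ [p.2])) PySem.Dict.empty := by
    rw [List.foldl_map]
  have hkeys : (a.foldl (fun d el => d.modify (pvDigSum el) [] (· ++ [el]))
      PySem.Dict.empty).keys = PySem.Set.ofList (a.map pvDigSum) := by
    have := PySem.Dict.keys_foldl_modify_key a pvDigSum ([] : List Int)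
      (fun _ el v => v ++ [el]) PySem.Dict.empty
    simpa [PySem.Set.update_nil_left] using this
  have hget : ∀ k, (a.foldl (fun d el => d.modify (pvDigSum el) [] (· ++ [el]))
      PySem.Dict.empty).getD k [] = a.filter (fun el => pvDigSum el == k) := by
    intro k
    rw [hfold, PySem.Dict.getD_foldl_modify_append]
    simp [List.filter_map, Function.comp_def]
  rw [PySem.List.foldl_append_eq_flatMap, List.nil_append]
  simp only [hkeys, hget]

lemma bucket_mem {a : List Int} {k x : Int}
    (hx : x ∈ PySem.List.sorted (a.filter (fun el => pvDigSum el == k)) (fun x => x)) :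
    x ∈ a ∧ pvDigSum x = k := by
  have h1 := (PySem.List.mem_sorted _ _ _ _).mp hx
  have h2 := List.mem_filter.mp h1
  exact ⟨h2.1, by simpa using h2.2⟩

lemma flat_filter_perm (ks : List Int) :
    ∀ (a : List Int), ks.Nodup → (∀ x ∈ a, pvDigSum x ∈ ks) →
      (ks.flatMap (fun k => a.filter (fun el => pvDigSum el == k))).Perm a := by
  induction ks with
  | nil =>
    intro a _ hcov
    have : a = [] := by
      cases a with
      | nil => rfl
      | cons x t => exact absurd (hcov x (by simp)) (by simp)
    simp [this]
  | cons k ks ih =>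
    intro a hnd hcov
    rw [List.flatMap_cons]
    have hrest : (ks.flatMap (fun k' => a.filter (fun el => pvDigSum el == k'))) =
        (ks.flatMap (fun k' => (a.filter (fun el => !(pvDigSum el == k))).filter
          (fun el => pvDigSum el == k'))) := by
      apply List.flatMap_congr  -- congruence over members
      intro k' hk'
      rw [List.filter_filter]
      apply List.filter_congr
      intro x _
      have hne : k' ≠ k := fun h => (List.nodup_cons.mp hnd).1 (h ▸ hk')
      by_cases h : pvDigSum x = k'
      · simp [h, hne]
      · simp [h]
    have hperm2 : (ks.flatMap (fun k' => (a.filter (fun el => !(pvDigSum el == k))).filter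
        (fun el => pvDigSum el == k'))).Perm (a.filter (fun el => !(pvDigSum el == k))) := by
      apply ih _ (List.nodup_cons.mp hnd).2
      intro x hx
      have hx' := List.mem_filter.mp hx
      rcases List.mem_cons.mp (hcov x hx'.1) with h | h
      · exact absurd (by simpa using h) (by simpa using hx'.2)
      · exact h
    exact ((List.Perm.refl (a.filter (fun el => pvDigSum el == k))).append
      (hrest ▸ hperm2)).trans (List.filter_append_perm _ a)

lemma B_perm (a : List Int) : (digitRootSort_alt a).Perm a := by
  rw [B_closed]
  have hS := PySem.List.sorted_perm (PySem.Set.ofList (a.map pvDigSum)) (fun k => k) false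
  have h1 : (digitRootSort_alt a).Perm
      ((PySem.Set.ofList (a.map pvDigSum)).flatMap
        (fun k => a.filter (fun el => pvDigSum el == k))) := by
    rw [B_closed]
    refine List.Perm.flatMap hS ?_
    intro k _
    exact PySem.List.sorted_perm _ _ _
  refine (B_closed a ▸ h1).trans ?_
  apply flat_filter_perm
  · exact PySem.Set.nodup_ofList _
  · intro x hx
    rw [PySem.Set.mem_ofList]
    exact List.mem_map_of_mem hx

lemma B_pairwise (a : List Int) :
    (digitRootSort_alt a).Pairwise (fun x y => pvK x ≤ pvK y) := by
  rw [B_closed, List.flatMap_def, List.pairwise_flatten]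
  constructor
  · intro l hl
    obtain ⟨k, _, rfl⟩ := List.mem_map.mp hl
    refine (PySem.List.sorted_pairwise (a.filter (fun el => pvDigSum el == k))
        (fun x => x)).imp_of_mem ?_
    intro x y hx hy hxy
    have hx' := bucket_mem hx
    have hy' := bucket_mem hy
    simp only [pvK, Prod.Lex.toLex_le_toLex]
    exact Or.inr ⟨by rw [hx'.2, hy'.2], hxy⟩
  · have hkeys := PySem.List.sorted_ofList_pairwise_lt (a.map pvDigSum)
    rw [List.pairwise_map]
    refine hkeys.imp_of_mem ?_
    intro k1 k2 _ _ hlt x hx y hy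
    have hx' := bucket_mem hx
    have hy' := bucket_mem hy
    simp only [pvK, Prod.Lex.toLex_le_toLex]
    exact Or.inl (by rw [hx'.2, hy'.2]; exact hlt)

-- ===== VERDICT (by name: the statement is the Claim_ definition above) =====
theorem digitRootSort_spec : Claim_equal_digitRootSort := by
  intro a _ _
  show digitRootSort a = digitRootSort_alt a
  exact PySem.List.eq_of_perm_of_pairwise_le_of_injective pvK pvK_inj
    ((A_perm a).trans (B_perm a).symm) (A_pairwise a) (B_pairwise a)
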